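-- pv_equiv track=rewrite | github.com/MartinTheMaker/txt2srt | txt2srt.py | make_srt
-- ===== SOURCE A (Python) =====
-- def ms_to_srt_time(ms: int) -> str:
--     # ms -> HH:MM:SS,mmm
--     if ms < 0:
--         ms = 0
--     h = ms // 3_600_000
--     ms %= 3_600_000
--     m = ms // 60_000
--     ms %= 60_000
--     s = ms // 1000
--     ms %= 1000
--     return f"{h:02d}:{m:02d}:{s:02d},{ms:03d}"
--
-- def make_srt(blocks: list[str], duration_ms: int, gap_ms: int = 0, start_offset_ms: int = 0) -> str:
--     out_lines = []
--     t = start_offset_ms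
--     idx = 1
--     for b in blocks:
--         start = t
--         end = t + duration_ms
--         out_lines.append(str(idx))
--         out_lines.append(f"{ms_to_srt_time(start)} --> {ms_to_srt_time(end)}")
--         out_lines.append(b)
--         out_lines.append("")  # Leerzeile
--         idx += 1
--         t = end + gap_ms
--     return "\n".join(out_lines)
-- ===== SOURCE B (Python) =====
-- def _fmt(ms: int) -> str:
--     ms = max(ms, 0)
--     parts = []
--     for unit, width in ((3_600_000, 2), (60_000, 2), (1_000, 2), (1, 3)):
--         parts.append(str(ms // unit).zfill(width))
--         ms %= unit
--     return "{}:{}:{},{}".format(*parts)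
--
-- def make_srt(blocks: list, duration_ms: int, gap_ms: int = 0, start_offset_ms: int = 0) -> str:
--     # staged passes: build the parallel columns first, then interleave them
--     n = len(blocks)
--     starts = [start_offset_ms + i * (duration_ms + gap_ms) for i in range(n)]
--     numbers = [str(i + 1) for i in range(n)]
--     times = [f"{_fmt(s)} --> {_fmt(s + duration_ms)}" for s in starts]
--     lines = []
--     for triple in zip(numbers, times, blocks):
--         lines.extend(triple)
--         lines.append("")
--     return "\n".join(lines)
-- ===== Notes on version B (the rewrite author's own statement) =====
-- stated objective: alternative
-- what changed: Instead of A's single loop threading a running time accumulator and a manual counter, B builds the subtitle in staged passes: three parallel columns (numbers, timestamp lines from closed-form start times over range(n), texts) computed independently, then interleaved with zip; the time formatter is a generic loop over a (unit,width) table instead of unrolled //-and-%= steps.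
import Mathlib
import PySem

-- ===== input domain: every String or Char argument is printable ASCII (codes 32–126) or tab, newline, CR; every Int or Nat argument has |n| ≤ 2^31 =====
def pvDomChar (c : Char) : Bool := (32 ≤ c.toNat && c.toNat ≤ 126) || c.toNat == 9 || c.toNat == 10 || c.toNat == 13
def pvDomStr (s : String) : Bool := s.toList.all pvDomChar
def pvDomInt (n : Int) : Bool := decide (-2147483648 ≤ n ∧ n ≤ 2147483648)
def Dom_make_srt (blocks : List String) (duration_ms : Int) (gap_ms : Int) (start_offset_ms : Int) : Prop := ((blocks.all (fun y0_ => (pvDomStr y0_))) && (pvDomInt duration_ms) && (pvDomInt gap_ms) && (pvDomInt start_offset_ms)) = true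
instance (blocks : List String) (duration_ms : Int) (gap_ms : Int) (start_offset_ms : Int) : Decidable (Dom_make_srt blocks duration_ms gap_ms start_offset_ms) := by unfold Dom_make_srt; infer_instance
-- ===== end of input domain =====

-- B replaces A's single accumulator loop by staged passes: three independent columns
-- (numbers, timestamp lines from closed-form start times, texts) interleaved with zip,
-- and a table-driven time formatter; objective: alternative decomposition, same O(n).

-- ===== PORT A =====
-- f"{x:02d}" / f"{x:03d}" on the nonnegative values reached here = zfill to width 2/3
def ms_to_srt_time (ms0 : Int) : String :=
  let ms := if ms0 < 0 then 0 else ms0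
  let h := PySem.Int.floordiv ms 3600000
  let ms := PySem.Int.mod ms 3600000
  let m := PySem.Int.floordiv ms 60000
  let ms := PySem.Int.mod ms 60000
  let s := PySem.Int.floordiv ms 1000
  let ms := PySem.Int.mod ms 1000
  PySem.Str.zfill (PySem.Int.toStr h) 2 ++ ":" ++ PySem.Str.zfill (PySem.Int.toStr m) 2
    ++ ":" ++ PySem.Str.zfill (PySem.Int.toStr s) 2 ++ "," ++ PySem.Str.zfill (PySem.Int.toStr ms) 3

def make_srt (blocks : List String) (duration_ms : Int) (gap_ms : Int) (start_offset_ms : Int) : String :=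
  let r := blocks.foldl (fun (st : List String × Int × Int) b =>
      let out_lines := st.1
      let t := st.2.1
      let idx := st.2.2
      let start := t
      let e := t + duration_ms
      (out_lines ++ [PySem.Int.toStr idx,
                     ms_to_srt_time start ++ " --> " ++ ms_to_srt_time e,
                     b, ""], e + gap_ms, idx + 1))
    ([], start_offset_ms, 1)
  PySem.Str.join "\n" r.1

-- ===== PORT B =====
-- the (unit, width) table loop of Source B's _fmt; "{}:{}:{},{}".format(*parts) = the 4-way match
def fmtB (ms0 : Int) : String :=
  let st := (([((3600000 : Int), (2 : Nat)), (60000, 2), (1000, 2), (1, 3)]).foldl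
    (fun (st : List String × Int) p =>
      (st.1 ++ [PySem.Str.zfill (PySem.Int.toStr (PySem.Int.floordiv st.2 p.1)) p.2],
       PySem.Int.mod st.2 p.1)) ([], max ms0 0))
  match st.1 with
  | [a, b, c, d] => a ++ ":" ++ b ++ ":" ++ c ++ "," ++ d
  | _ => ""

def make_srt_alt (blocks : List String) (duration_ms : Int) (gap_ms : Int) (start_offset_ms : Int) : String :=
  let n : Int := PySem.List.len blocks
  let starts := (PySem.List.pyRange 0 n 1).map (fun i => start_offset_ms + i * (duration_ms + gap_ms))
  let numbers := (PySem.List.pyRange 0 n 1).map (fun i => PySem.Int.toStr (i + 1))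
  let times := starts.map (fun s => fmtB s ++ " --> " ++ fmtB (s + duration_ms))
  let lines := (numbers.zip (times.zip blocks)).foldl
      (fun acc q => acc ++ [q.1, q.2.1, q.2.2, ""]) []
  PySem.Str.join "\n" lines

-- ===== PRECONDITION & SPEC =====
def Spec_make_srt (blocks : List String) (duration_ms : Int) (gap_ms : Int) (start_offset_ms : Int) (out : String) : Prop := out = make_srt_alt blocks duration_ms gap_ms start_offset_ms
instance (blocks : List String) (duration_ms : Int) (gap_ms : Int) (start_offset_ms : Int) (out : String) : Decidable (Spec_make_srt blocks duration_ms gap_ms start_offset_ms out) := by unfold Spec_make_srt; infer_instance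

-- ===== CLAIM (what is proved, stated in full; the proofs are below) =====
def Claim_equal_make_srt : Prop := ∀ (blocks : List String) (duration_ms : Int) (gap_ms : Int) (start_offset_ms : Int), Dom_make_srt blocks duration_ms gap_ms start_offset_ms → Spec_make_srt blocks duration_ms gap_ms start_offset_ms (make_srt blocks duration_ms gap_ms start_offset_ms)

-- ===== LEMMAS AND PROOFS =====

theorem fmtB_eq (ms : Int) : fmtB ms = ms_to_srt_time ms := by
  unfold fmtB ms_to_srt_time
  have h : max ms 0 = if ms < 0 then 0 else ms := by omega
  simp only [List.foldl, h]
  simp [PySem.Int.floordiv, PySem.Int.mod, Int.fdiv_one]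

-- A's four lines per block, as produced by its loop from time t and counter idx
def linesOf (d g : Int) : List String → Int → Int → List String
  | [], _, _ => []
  | b :: bs, t, idx =>
    PySem.Int.toStr idx :: (ms_to_srt_time t ++ " --> " ++ ms_to_srt_time (t + d)) ::
      b :: "" :: linesOf d g bs (t + d + g) (idx + 1)

-- B's zipped triples per block, same parametrisation
def tripsOf (d g : Int) : List String → Int → Int → List (String × String × String)
  | [], _, _ => []
  | b :: bs, t, idx =>
    (PySem.Int.toStr idx, ms_to_srt_time t ++ " --> " ++ ms_to_srt_time (t + d), b)
      :: tripsOf d g bs (t + d + g) (idx + 1)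

theorem foldA_eq (d g : Int) : ∀ (bs : List String) (acc : List String) (t idx : Int),
    (bs.foldl (fun (st : List String × Int × Int) b =>
      (st.1 ++ [PySem.Int.toStr st.2.2,
                ms_to_srt_time st.2.1 ++ " --> " ++ ms_to_srt_time (st.2.1 + d),
                b, ""], st.2.1 + d + g, st.2.2 + 1)) (acc, t, idx)).1
    = acc ++ linesOf d g bs t idx := by
  intro bs
  induction bs with
  | nil => intro acc t idx; simp [linesOf]
  | cons b bs ih =>
    intro acc t idx
    simp only [List.foldl, linesOf]
    rw [ih]
    simp

theorem zip_eq (d g s : Int) : ∀ (bs : List String) (a : Int),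
    (((PySem.List.pyRange a (a + bs.length) 1).map (fun i => PySem.Int.toStr (i + 1))).zip
     (((PySem.List.pyRange a (a + bs.length) 1).map (fun i =>
        ms_to_srt_time (s + i * (d + g)) ++ " --> " ++ ms_to_srt_time (s + i * (d + g) + d))).zip bs))
    = tripsOf d g bs (s + a * (d + g)) (a + 1) := by
  intro bs
  induction bs with
  | nil =>
    intro a
    simp only [List.length_nil, Nat.cast_zero, add_zero]
    rw [PySem.List.pyRange_one_eq_nil le_rfl]
    simp [tripsOf]
  | cons b bs ih =>
    intro a
    have hlen : (a : Int) + ((b :: bs).length : Int) = (a + 1) + (bs.length : Int) := by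
      push_cast [List.length_cons]; ring
    rw [hlen, PySem.List.pyRange_one_cons (by omega : a < (a + 1) + (bs.length : Int))]
    simp only [List.map_cons, List.zip_cons_cons, tripsOf]
    rw [ih (a + 1)]
    congr 1; ring_nf

theorem foldB_eq (trips : List (String × String × String)) :
    ∀ (acc : List String),
    (trips.foldl (fun acc (q : String × String × String) => acc ++ [q.1, q.2.1, q.2.2, ""]) acc)
    = acc ++ trips.flatMap (fun q => [q.1, q.2.1, q.2.2, ""]) := by
  induction trips with
  | nil => intro acc; simp
  | cons q trips ih =>
    intro acc
    simp only [List.foldl, List.flatMap_cons, ih]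
    simp

theorem flat_trips (d g : Int) : ∀ (bs : List String) (t idx : Int),
    (tripsOf d g bs t idx).flatMap (fun q => [q.1, q.2.1, q.2.2, ""]) = linesOf d g bs t idx := by
  intro bs
  induction bs with
  | nil => intro t idx; simp [tripsOf, linesOf]
  | cons b bs ih =>
    intro t idx
    simp [tripsOf, linesOf, ih]

-- ===== VERDICT (by name: the statement is the Claim_ definition above) =====
theorem make_srt_spec : Claim_equal_make_srt := by
  intro blocks d g s _
  unfold Spec_make_srt make_srt make_srt_alt
  simp only [List.map_map, Function.comp_def, fmtB_eq, PySem.List.len]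
  rw [foldA_eq d g blocks [] s 1]
  have h0 : (blocks.length : Int) = 0 + (blocks.length : Int) := by ring
  rw [h0, zip_eq d g s blocks 0, foldB_eq, flat_trips]
  simp
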